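-- pv_equiv track=rewrite | github.com/pypi-data/pypi-mirror-341 | packages/mostlyai-engine/mostlyai_engine-1.3.2-py3-none-any.whl/mostlyai/engine/_common.py | get_sub_columns_lookup
-- ===== SOURCE A (Python) =====
-- from typing import (
--     Any,
--     Literal,
--     NamedTuple,
--     Protocol,
-- )
--
-- SubColumnsNested = dict[str, list[str]]
--
-- class SubColumnLookup(NamedTuple):
--     col_name: str
--     col_idx: int  # column index within a list of columns
--     sub_col_idx: int  # index within the column it belongs to
--     sub_col_cum: int  # cumulative index within a list of columns
--     sub_col_offset: int  # offset of the first sub-column in the scope of the column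
--
-- def get_sub_columns_lookup(
--     sub_columns_nested: SubColumnsNested,
-- ) -> dict[str, SubColumnLookup]:
--     """
--     Create a convenient reverse lookup for each of the sub-columns
--     :param sub_columns_nested: must be grouped-by "columns"
--     :return: dict of sub_col -> SubColumnLookup items
--     """
--     sub_cols_lookup = {}
--     sub_col_cum_i = 0
--     for col_i, (name, sub_cols) in enumerate(sub_columns_nested.items()):
--         sub_col_offset = sub_col_cum_i
--         for sub_col_i, sub_col in enumerate(sub_cols):
--             sub_cols_lookup[sub_col] = SubColumnLookup(
--                 col_name=name,
--                 col_idx=col_i,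
--                 sub_col_idx=sub_col_i,
--                 sub_col_cum=sub_col_cum_i,
--                 sub_col_offset=sub_col_offset,
--             )
--             sub_col_cum_i += 1
--     return sub_cols_lookup
-- ===== SOURCE B (Python) =====
-- from typing import NamedTuple
--
--
-- class SubColumnLookup(NamedTuple):
--     col_name: str
--     col_idx: int
--     sub_col_idx: int
--     sub_col_cum: int
--     sub_col_offset: int
--
--
-- def get_sub_columns_lookup(sub_columns_nested):
--     # pass 1: prefix-sum table of cumulative sub-column counts per column
--     offsets = [0]
--     for sub_cols in sub_columns_nested.values():
--         offsets.append(offsets[-1] + len(sub_cols))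
--     # pass 2: populate the lookup purely from the table (no running counter)
--     return {
--         sub_col: SubColumnLookup(
--             col_name=name,
--             col_idx=col_i,
--             sub_col_idx=sub_col_i,
--             sub_col_cum=offsets[col_i] + sub_col_i,
--             sub_col_offset=offsets[col_i],
--         )
--         for col_i, (name, sub_cols) in enumerate(sub_columns_nested.items())
--         for sub_col_i, sub_col in enumerate(sub_cols)
--     }
-- ===== Notes on version B (the rewrite author's own statement) =====
-- stated objective: alternative
-- what changed: Replaces the mutable running cumulative counter threaded through the nested loops by a separately precomputed prefix-sum offset table, so the lookup is populated in a stateless comprehension with sub_col_cum and sub_col_offset computed arithmetically from the table.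
import Mathlib
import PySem

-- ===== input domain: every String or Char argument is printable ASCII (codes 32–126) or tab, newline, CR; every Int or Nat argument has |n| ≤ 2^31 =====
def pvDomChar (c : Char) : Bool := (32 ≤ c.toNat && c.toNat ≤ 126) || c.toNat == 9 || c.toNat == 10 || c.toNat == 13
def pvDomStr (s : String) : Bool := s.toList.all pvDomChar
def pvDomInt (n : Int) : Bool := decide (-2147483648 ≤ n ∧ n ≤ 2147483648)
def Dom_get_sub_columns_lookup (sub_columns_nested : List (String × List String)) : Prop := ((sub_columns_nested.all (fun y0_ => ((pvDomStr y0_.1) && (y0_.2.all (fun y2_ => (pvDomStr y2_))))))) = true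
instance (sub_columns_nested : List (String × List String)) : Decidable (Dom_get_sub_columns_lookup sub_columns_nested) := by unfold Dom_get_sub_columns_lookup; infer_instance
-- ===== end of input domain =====

-- B replaces A's running cumulative counter by a precomputed prefix-sum offset table (alternative decomposition, same cost).

-- ===== PORT A =====
def get_sub_columns_lookup (sub_columns_nested : List (String × List String)) : List (String × String × Int × Int × Int × Int) :=
  let final :=
    (PySem.List.enumerate sub_columns_nested 0).foldl
      (fun st p =>
        let sub_col_offset := st.2
        (PySem.List.enumerate p.2.2 0).foldl
          (fun st2 q => (st2.1.insert q.2 (p.2.1, p.1, q.1, st2.2, sub_col_offset), st2.2 + 1))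
          st)
      ((PySem.Dict.empty : PySem.Dict String (String × Int × Int × Int × Int)), (0 : Int))
  final.1.items

-- ===== PORT B =====
-- offsets = [0]; for sub_cols in values: offsets.append(offsets[-1] + len(sub_cols))
def pvOffsets (sub_columns_nested : List (String × List String)) : List Int :=
  sub_columns_nested.foldl (fun acc p => acc ++ [acc.getLast! + (p.2.length : Int)]) [0]

def get_sub_columns_lookup_alt (sub_columns_nested : List (String × List String)) : List (String × String × Int × Int × Int × Int) :=
  let offsets := pvOffsets sub_columns_nested
  -- dict comprehension: insert each (sub_col, lookup) pair in order into an empty dict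
  (((PySem.List.enumerate sub_columns_nested 0).flatMap (fun p =>
      (PySem.List.enumerate p.2.2 0).map (fun q =>
        (q.2, (p.2.1, p.1, q.1,
               PySem.List.pyGetD offsets p.1 0 + q.1,
               PySem.List.pyGetD offsets p.1 0))))).foldl
    (fun d kv => d.insert kv.1 kv.2)
    (PySem.Dict.empty : PySem.Dict String (String × Int × Int × Int × Int))).items

-- ===== PRECONDITION & SPEC =====
def Spec_get_sub_columns_lookup (sub_columns_nested : List (String × List String)) (out : List (String × String × Int × Int × Int × Int)) : Prop := out = get_sub_columns_lookup_alt sub_columns_nested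
instance (sub_columns_nested : List (String × List String)) (out : List (String × String × Int × Int × Int × Int)) : Decidable (Spec_get_sub_columns_lookup sub_columns_nested out) := by unfold Spec_get_sub_columns_lookup; infer_instance

-- ===== CLAIM (what is proved, stated in full; the proofs are below) =====
def Claim_equal_get_sub_columns_lookup : Prop := ∀ (sub_columns_nested : List (String × List String)), Dom_get_sub_columns_lookup sub_columns_nested → Spec_get_sub_columns_lookup sub_columns_nested (get_sub_columns_lookup sub_columns_nested)

-- ===== LEMMAS AND PROOFS =====

-- reference entry list: entries of one column (si = sub_col_idx counter, c = cumulative counter)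
def pvEntCol (name : String) (ci off : Int) : Int → Int → List String → List (String × (String × Int × Int × Int × Int))
  | _, _, [] => []
  | si, c, x :: t => (x, (name, ci, si, c, off)) :: pvEntCol name ci off (si + 1) (c + 1) t

-- reference entry list for all columns, column index ci, cumulative counter c
def pvEnts : Int → Int → List (String × List String) → List (String × (String × Int × Int × Int × Int))
  | _, _, [] => []
  | ci, c, p :: rest => pvEntCol p.1 ci c 0 c p.2 ++ pvEnts (ci + 1) (c + (p.2.length : Int)) rest

def pvSumLens (xs : List (String × List String)) : Int := (xs.map (fun p => (p.2.length : Int))).sum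

def pvIns (d : PySem.Dict String (String × Int × Int × Int × Int))
    (kv : String × (String × Int × Int × Int × Int)) : PySem.Dict String (String × Int × Int × Int × Int) :=
  d.insert kv.1 kv.2

-- A's inner loop = fold of pvEntCol entries, counter advanced by the column length
theorem pvA_inner (name : String) (ci off : Int) (subs : List String) :
    ∀ (s c : Int) (d : PySem.Dict String (String × Int × Int × Int × Int)),
    (PySem.List.enumerate subs s).foldl
      (fun st2 q => (st2.1.insert q.2 (name, ci, q.1, st2.2, off), st2.2 + 1)) (d, c)
    = ((pvEntCol name ci off s c subs).foldl pvIns d, c + (subs.length : Int)) := by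
  induction subs with
  | nil => intro s c d; simp [PySem.List.enumerate_nil, pvEntCol]
  | cons x t ih =>
    intro s c d
    rw [PySem.List.enumerate_cons]
    simp only [List.foldl_cons, pvEntCol, pvIns]
    rw [ih (s + 1) (c + 1)]
    congr 1
    simp only [List.length_cons]
    push_cast
    ring

-- A's outer loop = fold of pvEnts entries
theorem pvA_outer (xs : List (String × List String)) :
    ∀ (s c : Int) (d : PySem.Dict String (String × Int × Int × Int × Int)),
    (PySem.List.enumerate xs s).foldl
      (fun st p =>
        let sub_col_offset := st.2
        (PySem.List.enumerate p.2.2 0).foldl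
          (fun st2 q => (st2.1.insert q.2 (p.2.1, p.1, q.1, st2.2, sub_col_offset), st2.2 + 1))
          st) (d, c)
    = ((pvEnts s c xs).foldl pvIns d, c + pvSumLens xs) := by
  induction xs with
  | nil => intro s c d; simp [PySem.List.enumerate_nil, pvEnts, pvSumLens]
  | cons p rest ih =>
    intro s c d
    rw [PySem.List.enumerate_cons]
    simp only [List.foldl_cons]
    rw [pvA_inner p.1 s c p.2 0 c d, ih (s + 1) (c + (p.2.length : Int))]
    simp only [pvEnts, List.foldl_append, pvSumLens, List.map_cons, List.sum_cons]
    congr 1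
    ring

-- the offsets list built by B's append loop, in recursive form
def pvOffsList : Int → List (String × List String) → List Int
  | c, [] => [c]
  | c, p :: rest => c :: pvOffsList (c + (p.2.length : Int)) rest

theorem pvOffsList_fold (xs : List (String × List String)) :
    ∀ (acc : List Int) (c : Int),
    xs.foldl (fun acc p => acc ++ [acc.getLast! + (p.2.length : Int)]) (acc ++ [c])
    = acc ++ pvOffsList c xs := by
  induction xs with
  | nil => intro acc c; simp [pvOffsList]
  | cons p rest ih =>
    intro acc c
    simp only [List.foldl_cons]
    have hlast : (acc ++ [c]).getLast! = c := by
      cases acc with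
      | nil => rfl
      | cons a t =>
        unfold List.getLast!
        simp
    rw [hlast, ih (acc ++ [c]) (c + (p.2.length : Int))]
    simp [pvOffsList]

theorem pvOffsets_eq (xs : List (String × List String)) : pvOffsets xs = pvOffsList 0 xs := by
  have := pvOffsList_fold xs [] 0
  simpa [pvOffsets] using this

def pvG (offsets : List Int) (p : Int × (String × List String)) :
    List (String × (String × Int × Int × Int × Int)) :=
  (PySem.List.enumerate p.2.2 0).map (fun q =>
    (q.2, (p.2.1, p.1, q.1,
           PySem.List.pyGetD offsets p.1 0 + q.1,
           PySem.List.pyGetD offsets p.1 0)))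

theorem pvEntCol_map (name : String) (ci off : Int) (subs : List String) :
    ∀ (s : Int),
    (PySem.List.enumerate subs s).map (fun q => (q.2, (name, ci, q.1, off + q.1, off)))
    = pvEntCol name ci off s (off + s) subs := by
  induction subs with
  | nil => intro s; simp [PySem.List.enumerate_nil, pvEntCol]
  | cons x t ih =>
    intro s
    rw [PySem.List.enumerate_cons]
    simp only [List.map_cons, pvEntCol]
    rw [ih (s + 1)]
    have : off + (s + 1) = off + s + 1 := by ring
    rw [this]

theorem pvB_flat (offs : List Int) (xs : List (String × List String)) :
    ∀ (s c : Int),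
    (∀ j : Nat, j < xs.length → PySem.List.pyGetD offs (s + (j : Int)) 0 = c + pvSumLens (xs.take j)) →
    (PySem.List.enumerate xs s).flatMap (pvG offs) = pvEnts s c xs := by
  induction xs with
  | nil => intro s c _; simp [PySem.List.enumerate_nil, pvEnts]
  | cons p rest ih =>
    intro s c H
    rw [PySem.List.enumerate_cons]
    simp only [List.flatMap_cons, pvEnts]
    have h0 : PySem.List.pyGetD offs s 0 = c := by
      have := H 0 (by simp)
      simpa [pvSumLens] using this
    congr 1
    · show pvG offs (s, p) = pvEntCol p.1 s c 0 c p.2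
      unfold pvG
      simp only [h0]
      have := pvEntCol_map p.1 s c p.2 0
      simpa using this
    · apply ih (s + 1) (c + (p.2.length : Int))
      intro j hj
      have := H (j + 1) (by simpa using Nat.succ_lt_succ hj)
      simp only [List.take_succ_cons, pvSumLens, List.map_cons, List.sum_cons] at this ⊢
      push_cast at this ⊢
      have e : s + 1 + (j : Int) = s + ((j : Int) + 1) := by ring
      rw [e, this]
      ring

theorem pvGetD_offsList (k : Nat) :
    ∀ (xs : List (String × List String)) (c : Int), k ≤ xs.length →
    PySem.List.pyGetD (pvOffsList c xs) (k : Int) 0 = c + pvSumLens (xs.take k) := by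
  induction k with
  | zero =>
    intro xs c _
    rw [show ((0 : Nat) : Int) = ((0 : Nat) : Int) from rfl, PySem.List.pyGetD_natCast]
    cases xs <;> simp [pvOffsList, pvSumLens]
  | succ n ih =>
    intro xs c hk
    cases xs with
    | nil => simp at hk
    | cons p rest =>
      simp only [pvOffsList]
      rw [PySem.List.pyGetD_natCast]
      have h2 : (c :: pvOffsList (c + (p.2.length : Int)) rest).getD (n + 1) 0
          = (pvOffsList (c + (p.2.length : Int)) rest).getD n 0 := by
        simp
      rw [h2, ← PySem.List.pyGetD_natCast,
          ih rest (c + (p.2.length : Int)) (by simpa using Nat.succ_le_succ_iff.mp hk)]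
      simp only [List.take_succ_cons, pvSumLens, List.map_cons, List.sum_cons]
      ring

-- ===== VERDICT (by name: the statement is the Claim_ definition above) =====
theorem get_sub_columns_lookup_spec : Claim_equal_get_sub_columns_lookup := by
  intro xs _
  unfold Spec_get_sub_columns_lookup
  have hA' : get_sub_columns_lookup xs = ((pvEnts 0 0 xs).foldl pvIns PySem.Dict.empty).items := by
    show (((PySem.List.enumerate xs 0).foldl
      (fun st p =>
        let sub_col_offset := st.2
        (PySem.List.enumerate p.2.2 0).foldl
          (fun st2 q => (st2.1.insert q.2 (p.2.1, p.1, q.1, st2.2, sub_col_offset), st2.2 + 1))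
          st)
      ((PySem.Dict.empty : PySem.Dict String (String × Int × Int × Int × Int)), (0 : Int))).1).items
      = ((pvEnts 0 0 xs).foldl pvIns PySem.Dict.empty).items
    rw [pvA_outer xs 0 0 PySem.Dict.empty]
  have hflat : (PySem.List.enumerate xs 0).flatMap (pvG (pvOffsets xs)) = pvEnts 0 0 xs := by
    rw [pvOffsets_eq]
    apply pvB_flat
    intro j hj
    have := pvGetD_offsList j xs 0 (Nat.le_of_lt hj)
    simpa using this
  have hB' : get_sub_columns_lookup_alt xs
      = (((PySem.List.enumerate xs 0).flatMap (pvG (pvOffsets xs))).foldl pvIns PySem.Dict.empty).items := rfl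
  rw [hA', hB', hflat]
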